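-- pv_equiv track=rewrite | github.com/jferard/datagouv_tools | import_sirene.py | split_on_cat
-- ===== SOURCE A (Python) =====
-- from typing import Mapping, Iterable, Any, Optional, Tuple, Iterator, \
--     Callable, Sequence
--
-- def split_on_cat(text: str,
--                  dont_split: Optional[
--                      Iterable[Tuple[Optional[str], Optional[str]]]] = None
--                  ) -> Iterable[str]:
--     """
--     Split the text on unicodedata differences. The default behavior ignores
--     transitions from upper case to lower case:
--
--     >>> list(split_on_cat("LoremIpsum"))
--     ['Lorem', 'Ipsum']
--
--     You can specifiy transisions to ignore in unicode categories. No transition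
--     ignored:
--     >>> list(split_on_cat("LoremIpsum", ()))
--     ['L', 'orem', 'I', 'psum']
--
--     Ignore all transitions before a number:
--     >>> list(split_on_cat("Lorem2Ipsum", ((None, "Nd"),)))
--     ['L', 'orem2', 'I', 'psum']
--
--     Ignore all transitions:
--     >>> list(split_on_cat("LoremIpsum", ((None, None),)))
--     ['LoremIpsum']
--
--     :param text: the text
--     :param dont_split: transitions (cat1, cat2) that are not a valid split
--     :return: yield chunks of text
--     """
--     import unicodedata
--     if dont_split is None:
--         dont_split = (("Lu", "Ll"),)
--
--     def split_between(lc, c):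
--         for ds_lc, ds_c in dont_split:
--             if ((ds_lc is None or lc == ds_lc)
--                     and (ds_c is None or c == ds_c)):
--                 return False
--
--         return True
--
--     previous_end = None
--     last_cat = unicodedata.category(text[0])
--     for i, cat in enumerate(map(unicodedata.category, text)):
--         if cat != last_cat and split_between(last_cat, cat):
--             yield text[previous_end:i]
--             previous_end = i
--         last_cat = cat
--     yield text[previous_end:None]
-- ===== SOURCE B (Python) =====
-- import itertools
-- import unicodedata
--
--
-- def split_on_cat(text, dont_split=None):
--     if dont_split is None:
--         dont_split = (("Lu", "Ll"),)
--
--     def split_between(lc, c):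
--         for ds_lc, ds_c in dont_split:
--             if ((ds_lc is None or lc == ds_lc)
--                     and (ds_c is None or c == ds_c)):
--                 return False
--         return True
--
--     runs = [(cat, "".join(group))
--             for cat, group in itertools.groupby(text, key=unicodedata.category)]
--     if not runs:
--         return []
--     out = []
--     cat, buf = runs[0]
--     for next_cat, chunk in runs[1:]:
--         if split_between(cat, next_cat):
--             out.append(buf)
--             buf = chunk
--         else:
--             buf += chunk
--         cat = next_cat
--     out.append(buf)
--     return out
-- ===== Notes on version B (the rewrite author's own statement) =====
-- stated objective: idiomatic
-- what changed: B first groups the text into maximal same-category runs (itertools.groupby) and then merges adjacent runs with one split_between test per run boundary, instead of A's per-character index loop that yields slices of the original string; B also returns [] on the empty string where A raises IndexError.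
import Mathlib
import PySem

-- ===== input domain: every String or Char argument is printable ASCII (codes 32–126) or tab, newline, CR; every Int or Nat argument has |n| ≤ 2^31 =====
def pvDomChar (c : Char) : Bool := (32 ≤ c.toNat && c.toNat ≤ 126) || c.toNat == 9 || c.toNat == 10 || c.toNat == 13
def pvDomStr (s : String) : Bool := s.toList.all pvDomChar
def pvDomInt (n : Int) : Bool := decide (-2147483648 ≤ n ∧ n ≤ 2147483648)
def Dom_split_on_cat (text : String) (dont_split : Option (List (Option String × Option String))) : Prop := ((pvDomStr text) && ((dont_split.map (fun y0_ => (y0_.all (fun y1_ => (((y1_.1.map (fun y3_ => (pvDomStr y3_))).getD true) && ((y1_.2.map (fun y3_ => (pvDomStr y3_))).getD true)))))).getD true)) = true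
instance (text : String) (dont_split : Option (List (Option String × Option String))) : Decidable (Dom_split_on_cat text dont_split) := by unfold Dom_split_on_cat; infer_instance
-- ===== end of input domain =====

-- B groups the text into maximal same-category runs and merges adjacent runs (one split_between
-- test per run boundary) instead of A's per-character index loop yielding slices; the empty
-- string, on which A raises IndexError, is excluded by Pre_.

-- ===== PORT A =====
-- unicodedata.category, exact on printable ASCII plus tab/newline/CR ("Cn" outside that domain,
-- where nothing is claimed); shared by both ports as both Pythons call unicodedata.category.
def pvCat (c : Char) : String :=
  if 97 ≤ c.toNat ∧ c.toNat ≤ 122 then "Ll"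
  else if 65 ≤ c.toNat ∧ c.toNat ≤ 90 then "Lu"
  else if 48 ≤ c.toNat ∧ c.toNat ≤ 57 then "Nd"
  else if c = ' ' then "Zs"
  else if c ∈ ['!', '"', '#', '%', '&', '\'', '*', ',', '.', '/', ':', ';', '?', '@', '\\'] then "Po"
  else if c = '$' then "Sc"
  else if c ∈ ['(', '[', '{'] then "Ps"
  else if c ∈ [')', ']', '}'] then "Pe"
  else if c ∈ ['+', '<', '=', '>', '|', '~'] then "Sm"
  else if c = '-' then "Pd"
  else if c ∈ ['^', '`'] then "Sk"
  else if c = '_' then "Pc"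
  else if c.toNat = 9 ∨ c.toNat = 10 ∨ c.toNat = 13 then "Cc"
  else "Cn"

-- split_between: the loop returns False as soon as a pair matches, else True (identical in A and B).
def pvSplitBetween (ds : List (Option String × Option String)) (lc c : String) : Bool :=
  ds.all fun p => !((p.1.elim true (fun v => lc == v)) && (p.2.elim true (fun v => c == v)))

-- one iteration of A's `for i, cat in enumerate(map(category, text))` loop body
def pvStepA (ds : List (Option String × Option String)) (cs : List Char)
    (st : List String × Option Int × String) (p : Int × String) :
    List String × Option Int × String :=
  if p.2 ≠ st.2.2 ∧ pvSplitBetween ds st.2.2 p.2 = true then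
    (st.1 ++ [String.ofList (PySem.List.slice cs st.2.1 (some p.1))], some p.1, p.2)
  else (st.1, st.2.1, p.2)

def split_on_cat (text : String) (dont_split : Option (List (Option String × Option String))) : List String :=
  let ds := dont_split.getD [(some "Lu", some "Ll")]
  let cs := text.toList
  match cs with
  | [] => []  -- Python: `text[0]` raises IndexError here; excluded by Pre_split_on_cat
  | c0 :: _ =>
    let st := (PySem.List.enumerate (cs.map pvCat) 0).foldl (pvStepA ds cs) ([], none, pvCat c0)
    st.1 ++ [String.ofList (PySem.List.slice cs st.2.1 none)]

-- ===== PORT B =====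
-- itertools.groupby(text, key=unicodedata.category): maximal runs, each with its category
def pvRuns (cs : List Char) : List (String × List Char) :=
  match cs with
  | [] => []
  | c :: rest =>
      (pvCat c, c :: rest.takeWhile (fun d => pvCat d == pvCat c)) ::
        pvRuns (rest.dropWhile (fun d => pvCat d == pvCat c))
termination_by cs.length
decreasing_by
  simpa using Nat.lt_succ_of_le (List.length_dropWhile_le _ _)

-- B's merging loop over runs[1:], maintaining (cat, buf)
def pvMerge (ds : List (Option String × Option String)) (cat : String) (buf : List Char) :
    List (String × List Char) → List String
  | [] => [String.ofList buf]
  | (k, g) :: rs =>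
      if pvSplitBetween ds cat k = true then String.ofList buf :: pvMerge ds k g rs
      else pvMerge ds k (buf ++ g) rs

def split_on_cat_alt (text : String) (dont_split : Option (List (Option String × Option String))) : List String :=
  let ds := dont_split.getD [(some "Lu", some "Ll")]
  match pvRuns text.toList with
  | [] => []
  | (k, g) :: rs => pvMerge ds k g rs

-- ===== PRECONDITION & SPEC =====
-- Pre_ excludes only the empty string, on which A's `text[0]` raises IndexError.
def Pre_split_on_cat (text : String) (dont_split : Option (List (Option String × Option String))) : Prop :=
  text ≠ ""
instance (text : String) (dont_split : Option (List (Option String × Option String))) : Decidable (Pre_split_on_cat text dont_split) := by unfold Pre_split_on_cat; infer_instance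

def pvWitness_split_on_cat : String × (Option (List (Option String × Option String))) := ("LoremIpsum", none)

def Spec_split_on_cat (text : String) (dont_split : Option (List (Option String × Option String))) (out : List String) : Prop := out = split_on_cat_alt text dont_split
instance (text : String) (dont_split : Option (List (Option String × Option String))) (out : List String) : Decidable (Spec_split_on_cat text dont_split out) := by unfold Spec_split_on_cat; infer_instance

-- ===== CLAIM (what is proved, stated in full; the proofs are below) =====
def Claim_equal_split_on_cat : Prop := ∀ (text : String) (dont_split : Option (List (Option String × Option String))), Dom_split_on_cat text dont_split → Pre_split_on_cat text dont_split → Spec_split_on_cat text dont_split (split_on_cat text dont_split)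

-- ===== LEMMAS AND PROOFS =====

-- common reference point: character-by-character chunking with an explicit buffer
def pvGo (ds : List (Option String × Option String)) (lastCat : String) (buf : List Char) :
    List Char → List String
  | [] => [String.ofList buf]
  | c :: rest =>
      if pvCat c ≠ lastCat ∧ pvSplitBetween ds lastCat (pvCat c) = true then
        String.ofList buf :: pvGo ds (pvCat c) [c] rest
      else pvGo ds (pvCat c) (buf ++ [c]) rest

-- `previous_end` is None (meaning 0) or `some p`
def pvRep (pe : Option Int) (p : Nat) : Prop := (pe = none ∧ p = 0) ∨ pe = some (p : Int)

theorem pvSlice_rep (cs : List Char) {pe : Option Int} {p : Nat} (h : pvRep pe p) (b : Nat) :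
    PySem.List.slice cs pe (some (b : Int)) = (cs.drop p).take (b - p) := by
  rcases h with ⟨h1, h2⟩ | h1
  · subst h1; subst h2; simp [PySem.List.slice_to_natCast]
  · subst h1; exact PySem.List.slice_natCast cs p b

theorem pvSlice_rep_none (cs : List Char) {pe : Option Int} {p : Nat} (h : pvRep pe p) :
    PySem.List.slice cs pe none = cs.drop p := by
  rcases h with ⟨h1, h2⟩ | h1
  · subst h1; subst h2; simp [PySem.List.slice_none_none]
  · subst h1; exact PySem.List.slice_from_natCast cs p

-- growing the buffer by one character
theorem pvBuf_snoc (pre rest : List Char) (c : Char) (p : Nat) (hp : p ≤ pre.length) :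
    ((pre ++ c :: rest).drop p).take (pre.length + 1 - p)
      = ((pre ++ c :: rest).drop p).take (pre.length - p) ++ [c] := by
  rw [List.drop_append_of_le_length hp]
  have hl : (pre.drop p).length = pre.length - p := by simp
  have h1 : pre.length + 1 - p = (pre.drop p).length + 1 := by omega
  have h2 : pre.length - p = (pre.drop p).length + 0 := by omega
  rw [h1, h2, List.take_append, List.take_append]
  simp

-- A's loop, from an arbitrary position, computes pvGo of the remaining characters
theorem pvFoldA (ds : List (Option String × Option String)) (cs : List Char) :
    ∀ (rest pre : List Char) (p : Nat) (pe : Option Int) (acc : List String) (lastCat : String),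
    cs = pre ++ rest → p ≤ pre.length → pvRep pe p →
    (let st := (PySem.List.enumerate (rest.map pvCat) (pre.length : Int)).foldl (pvStepA ds cs) (acc, pe, lastCat)
     st.1 ++ [String.ofList (PySem.List.slice cs st.2.1 none)])
      = acc ++ pvGo ds lastCat ((cs.drop p).take (pre.length - p)) rest := by
  intro rest
  induction rest with
  | nil =>
    intro pre p pe acc lastCat hcs hp hrep
    simp only [List.map_nil, PySem.List.enumerate_nil, List.foldl_nil, pvGo]
    rw [pvSlice_rep_none cs hrep]
    have : cs.drop p = (cs.drop p).take (pre.length - p) := by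
      refine (List.take_of_length_le ?_).symm
      subst hcs; simp
    rw [← this]
  | cons c rest' ih =>
    intro pre p pe acc lastCat hcs hp hrep
    simp only [List.map_cons, PySem.List.enumerate_cons, List.foldl_cons]
    have hdrop : cs.drop pre.length = c :: rest' := by subst hcs; simp
    by_cases hc : pvCat c ≠ lastCat ∧ pvSplitBetween ds lastCat (pvCat c) = true
    · rw [show pvStepA ds cs (acc, pe, lastCat) ((pre.length : Int), pvCat c)
            = (acc ++ [String.ofList (PySem.List.slice cs pe (some (pre.length : Int)))],
               some (pre.length : Int), pvCat c) by simp [pvStepA, hc.1, hc.2]]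
      have hstart : (pre.length : Int) + 1 = ((pre ++ [c]).length : Int) := by simp
      rw [hstart]
      rw [ih (pre ++ [c]) pre.length (some (pre.length : Int))
            (acc ++ [String.ofList (PySem.List.slice cs pe (some (pre.length : Int)))]) (pvCat c)
            (by rw [hcs]; simp) (by simp) (Or.inr rfl)]
      have hbuf1 : (cs.drop pre.length).take ((pre ++ [c]).length - pre.length) = [c] := by
        rw [hdrop]; simp
      rw [hbuf1, pvSlice_rep cs hrep pre.length]
      simp only [pvGo, if_pos hc, List.append_assoc, List.singleton_append]
    · rw [show pvStepA ds cs (acc, pe, lastCat) ((pre.length : Int), pvCat c)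
            = (acc, pe, pvCat c) by simp only [pvStepA]; rw [if_neg hc]]
      have hstart : (pre.length : Int) + 1 = ((pre ++ [c]).length : Int) := by simp
      rw [hstart]
      rw [ih (pre ++ [c]) p pe acc (pvCat c) (by rw [hcs]; simp) (by simp; omega) hrep]
      have hbuf : (cs.drop p).take ((pre ++ [c]).length - p)
          = (cs.drop p).take (pre.length - p) ++ [c] := by
        have := pvBuf_snoc pre rest' c p hp
        rw [hcs]; simpa using this
      rw [hbuf]
      simp only [pvGo, if_neg hc]

-- A equals pvGo
theorem pvA_eq_go (ds : List (Option String × Option String)) (text : String)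
    (c0 : Char) (tl : List Char) (h : text.toList = c0 :: tl) :
    split_on_cat text (some ds) = pvGo ds (pvCat c0) [] (c0 :: tl) := by
  unfold split_on_cat
  simp only [Option.getD_some, h]
  have := pvFoldA ds (c0 :: tl) (c0 :: tl) [] 0 none [] (pvCat c0)
    (by simp) (by simp) (Or.inl ⟨rfl, rfl⟩)
  simpa using this

-- pvGo absorbs a block of same-category characters into the buffer
theorem pvGo_absorb (ds : List (Option String × Option String)) (k : String) :
    ∀ (g rest buf : List Char), (∀ d ∈ g, pvCat d = k) →
    pvGo ds k buf (g ++ rest) = pvGo ds k (buf ++ g) rest := by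
  intro g
  induction g with
  | nil => intro rest buf _; simp
  | cons d g' ih =>
    intro rest buf hg
    have hd : pvCat d = k := hg d (by simp)
    simp only [List.cons_append, pvGo, hd, ne_eq, not_true_eq_false, false_and, if_false]
    rw [ih rest (buf ++ [d]) (fun x hx => hg x (by simp [hx]))]
    simp

-- pvGo equals B's merge of the runs, whenever the next character starts a new run
theorem pvGo_eq_merge (ds : List (Option String × Option String)) :
    ∀ (cs : List Char) (k : String) (buf : List Char),
    (∀ c, cs.head? = some c → pvCat c ≠ k) →
    pvGo ds k buf cs = pvMerge ds k buf (pvRuns cs) := by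
  intro cs
  induction cs using pvRuns.induct with
  | case1 => intro k buf _; simp [pvGo, pvRuns, pvMerge]
  | case2 c rest ih =>
    intro k buf hh
    have hck : pvCat c ≠ k := hh c rfl
    have hrest : rest = rest.takeWhile (fun d => pvCat d == pvCat c)
        ++ rest.dropWhile (fun d => pvCat d == pvCat c) := (List.takeWhile_append_dropWhile).symm
    have htw : ∀ d ∈ rest.takeWhile (fun d => pvCat d == pvCat c), pvCat d = pvCat c := by
      intro d hd
      simpa using List.mem_takeWhile_imp hd
    have hdw : ∀ x, (rest.dropWhile (fun d => pvCat d == pvCat c)).head? = some x →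
        pvCat x ≠ pvCat c := by
      intro x hx
      cases hdr : rest.dropWhile (fun d => pvCat d == pvCat c) with
      | nil => simp [hdr] at hx
      | cons y ys =>
        rw [hdr] at hx
        simp only [List.head?_cons, Option.some.injEq] at hx
        subst hx
        have := List.head_dropWhile_not (fun d => pvCat d == pvCat c) (l := rest)
          (by simp [hdr])
        simpa [hdr] using this
    rw [show pvRuns (c :: rest)
        = (pvCat c, c :: rest.takeWhile (fun d => pvCat d == pvCat c)) ::
            pvRuns (rest.dropWhile (fun d => pvCat d == pvCat c)) from by rw [pvRuns]]
    by_cases hs : pvSplitBetween ds k (pvCat c) = true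
    · simp only [pvGo, hck, ne_eq, not_false_iff, true_and, hs, if_true, pvMerge]
      congr 1
      conv_lhs => rw [hrest]
      rw [pvGo_absorb ds (pvCat c) _ _ [c] htw]
      rw [ih (pvCat c) _ hdw]
      simp
    · simp only [pvGo, hck, ne_eq, not_false_iff, true_and, hs, if_false, pvMerge,
        Bool.false_eq_true]
      conv_lhs => rw [hrest]
      rw [pvGo_absorb ds (pvCat c) _ _ (buf ++ [c]) htw]
      rw [ih (pvCat c) _ hdw]
      congr 1
      simp

-- B equals pvGo
theorem pvB_eq_go (ds : List (Option String × Option String)) (text : String)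
    (c0 : Char) (tl : List Char) (h : text.toList = c0 :: tl) :
    split_on_cat_alt text (some ds) = pvGo ds (pvCat c0) [] (c0 :: tl) := by
  unfold split_on_cat_alt
  simp only [Option.getD_some, h]
  rw [show pvRuns (c0 :: tl)
      = (pvCat c0, c0 :: tl.takeWhile (fun d => pvCat d == pvCat c0)) ::
          pvRuns (tl.dropWhile (fun d => pvCat d == pvCat c0)) from by rw [pvRuns]]
  show pvMerge ds (pvCat c0) (c0 :: tl.takeWhile (fun d => pvCat d == pvCat c0))
      (pvRuns (tl.dropWhile (fun d => pvCat d == pvCat c0)))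
    = pvGo ds (pvCat c0) [] (c0 :: tl)
  have htw : ∀ d ∈ tl.takeWhile (fun d => pvCat d == pvCat c0), pvCat d = pvCat c0 := by
    intro d hd; simpa using List.mem_takeWhile_imp hd
  have hdw : ∀ x, (tl.dropWhile (fun d => pvCat d == pvCat c0)).head? = some x →
      pvCat x ≠ pvCat c0 := by
    intro x hx
    cases hdr : tl.dropWhile (fun d => pvCat d == pvCat c0) with
    | nil => simp [hdr] at hx
    | cons y ys =>
      rw [hdr] at hx
      simp only [List.head?_cons, Option.some.injEq] at hx
      subst hx
      have := List.head_dropWhile_not (fun d => pvCat d == pvCat c0) (l := tl)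
        (by simp [hdr])
      simpa [hdr] using this
  rw [← pvGo_eq_merge ds _ (pvCat c0) _ hdw]
  have h1 : pvGo ds (pvCat c0) [] (c0 :: tl) = pvGo ds (pvCat c0) [c0] tl := by
    simp [pvGo]
  have h2 : pvGo ds (pvCat c0) [c0] tl
      = pvGo ds (pvCat c0) ([c0] ++ tl.takeWhile (fun d => pvCat d == pvCat c0))
          (tl.dropWhile (fun d => pvCat d == pvCat c0)) := by
    conv_lhs => rw [show tl = tl.takeWhile (fun d => pvCat d == pvCat c0)
        ++ tl.dropWhile (fun d => pvCat d == pvCat c0) from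
        (List.takeWhile_append_dropWhile).symm]
    exact pvGo_absorb ds (pvCat c0) _ _ [c0] htw
  rw [h1, h2]
  simp

-- ===== VERDICT (by name: the statement is the Claim_ definition above) =====
theorem split_on_cat_spec : Claim_equal_split_on_cat := by
  intro text dont_split _ hpre
  unfold Spec_split_on_cat
  have hne : text.toList ≠ [] := by
    intro h
    exact hpre (String.toList_eq_nil_iff.mp h)
  obtain ⟨c0, tl, h⟩ : ∃ c0 tl, text.toList = c0 :: tl := by
    cases hl : text.toList with
    | nil => exact absurd hl hne
    | cons a b => exact ⟨a, b, rfl⟩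
  have key : ∀ ds, split_on_cat text (some ds) = split_on_cat_alt text (some ds) := by
    intro ds
    rw [pvA_eq_go ds text c0 tl h, pvB_eq_go ds text c0 tl h]
  cases dont_split with
  | some ds => exact key ds
  | none =>
    have hA : split_on_cat text none = split_on_cat text (some [(some "Lu", some "Ll")]) := rfl
    have hB : split_on_cat_alt text none = split_on_cat_alt text (some [(some "Lu", some "Ll")]) := rfl
    rw [hA, hB]
    exact key _
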